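-- pv_equiv track=rewrite | github.com/jtreeves/advent_of_code_2025_solutions | day_9/solution.py | find_leftmost_space
-- ===== SOURCE A (Python) =====
-- from typing import List
--
-- def find_leftmost_space(blocks: List[str], file_length: int) -> int:
--     free_length = 0
--     start_index = -1
--
--     for i, block in enumerate(blocks):
--         if block == '.':
--             if free_length == 0:
--                 start_index = i
--             free_length += 1
--             if free_length == file_length:
--                 return start_index
--         else:
--             free_length = 0
--
--     return -1
-- ===== SOURCE B (Python) =====
-- from itertools import groupby
--
-- def find_leftmost_space(blocks, file_length):
--     if file_length < 1:
--         return -1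
--     start = 0
--     for key, group in groupby(blocks):
--         n = len(list(group))
--         if key == '.' and n >= file_length:
--             return start
--         start += n
--     return -1
-- ===== Notes on version B (the rewrite author's own statement) =====
-- stated objective: idiomatic
-- what changed: B materializes maximal runs with itertools.groupby and scans run lengths with a cumulative start index, instead of A's incremental counter/reset state machine; file_length < 1 is handled up front.
import Mathlib
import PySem

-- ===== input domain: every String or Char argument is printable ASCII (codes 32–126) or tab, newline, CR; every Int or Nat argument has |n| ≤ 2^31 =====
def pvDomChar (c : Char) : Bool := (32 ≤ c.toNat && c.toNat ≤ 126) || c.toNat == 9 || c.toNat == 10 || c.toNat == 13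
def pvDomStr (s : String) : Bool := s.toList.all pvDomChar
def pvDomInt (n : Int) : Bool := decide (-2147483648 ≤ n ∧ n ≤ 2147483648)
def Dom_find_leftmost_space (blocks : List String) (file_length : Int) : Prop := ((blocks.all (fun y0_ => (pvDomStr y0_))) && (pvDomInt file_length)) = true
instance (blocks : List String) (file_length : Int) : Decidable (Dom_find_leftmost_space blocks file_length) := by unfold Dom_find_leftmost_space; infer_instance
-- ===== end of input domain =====

-- B groups the blocks into maximal runs (itertools.groupby) and scans the run list
-- with a cumulative start index, instead of A's incremental counter/reset state machine.

-- ===== PORT A =====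
-- A's loop: state (free_length, start_index), early return when the counter hits file_length.
def pvGoA (fl : Int) : List String → Int → Int → Int → Int
  | [], _, _, _ => -1
  | b :: rest, i, free, start =>
    if b = "." then
      let start' := if free = 0 then i else start
      if free + 1 = fl then start'
      else pvGoA fl rest (i + 1) (free + 1) start'
    else pvGoA fl rest (i + 1) 0 start

def find_leftmost_space (blocks : List String) (file_length : Int) : Int :=
  pvGoA file_length blocks 0 0 (-1)

-- ===== PORT B =====
-- itertools.groupby: run-length encode the list into (key, length) groups, forward.
def pvGroupGo : List String → String → Nat → List (String × Nat)
  | [], k, n => [(k, n)]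
  | b :: rest, k, n => if b = k then pvGroupGo rest k (n + 1) else (k, n) :: pvGroupGo rest b 1

def pvGroups : List String → List (String × Nat)
  | [] => []
  | b :: rest => pvGroupGo rest b 1

-- B's loop over groups with a cumulative start index.
def pvScanB (fl : Int) : List (String × Nat) → Int → Int
  | [], _ => -1
  | (k, n) :: t, start => if k = "." ∧ fl ≤ (n : Int) then start else pvScanB fl t (start + n)

def find_leftmost_space_alt (blocks : List String) (file_length : Int) : Int :=
  if file_length < 1 then -1 else pvScanB file_length (pvGroups blocks) 0

-- ===== PRECONDITION & SPEC =====
def Spec_find_leftmost_space (blocks : List String) (file_length : Int) (out : Int) : Prop := out = find_leftmost_space_alt blocks file_length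
instance (blocks : List String) (file_length : Int) (out : Int) : Decidable (Spec_find_leftmost_space blocks file_length out) := by unfold Spec_find_leftmost_space; infer_instance

-- ===== CLAIM (what is proved, stated in full; the proofs are below) =====
def Claim_equal_find_leftmost_space : Prop := ∀ (blocks : List String) (file_length : Int), Dom_find_leftmost_space blocks file_length → Spec_find_leftmost_space blocks file_length (find_leftmost_space blocks file_length)

-- ===== LEMMAS AND PROOFS =====

-- A never returns a run when file_length < 1: the counter free+1 ≥ 1 never equals fl.
theorem pvGoA_neg (fl : Int) (hfl : fl < 1) :
    ∀ (l : List String) (i free st : Int), 0 ≤ free → pvGoA fl l i free st = -1 := by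
  intro l
  induction l with
  | nil => intro i free st _; rfl
  | cons b t ih =>
    intro i free st hfree
    by_cases hb : b = "."
    · have hne : ¬ (free + 1 = fl) := by omega
      simp [pvGoA, hb, hne]
      exact ih _ _ _ (by omega)
    · simp [pvGoA, hb]
      exact ih _ _ _ (by omega)

-- A's result with free=0 does not depend on the start accumulator.
theorem pvGoA_start_irrel (fl : Int) :
    ∀ (l : List String) (i st st' : Int), pvGoA fl l i 0 st = pvGoA fl l i 0 st' := by
  intro l
  induction l with
  | nil => intro i st st'; rfl
  | cons b t ih =>
    intro i st st'
    by_cases hb : b = "."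
    · simp [pvGoA, hb]
    · simp [pvGoA, hb]; exact ih _ _ _

-- A mid-run: 1 ≤ j < fl dots already counted with start fixed at st.
theorem pvGoA_run_mid (fl : Int) :
    ∀ (m : Nat) (rest : List String) (i j st : Int), 1 ≤ j → j < fl →
      rest.head? ≠ some "." →
      pvGoA fl (List.replicate m "." ++ rest) i j st =
        if fl ≤ j + (m : Int) then st else pvGoA fl rest (i + m) 0 st := by
  intro m
  induction m with
  | zero =>
    intro rest i j st hj hjfl hrest
    have hnot : ¬ fl ≤ j + ((0 : Nat) : Int) := by omega
    simp only [List.replicate, List.nil_append, hnot, if_false]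
    cases rest with
    | nil => rfl
    | cons b t =>
      have hb : b ≠ "." := by
        intro h; apply hrest; simp [h]
      simp [pvGoA, hb]
  | succ m ih =>
    intro rest i j st hj hjfl hrest
    have hj0 : ¬ (j = 0) := by omega
    by_cases hret : j + 1 = fl
    · have hle : fl ≤ j + ((m + 1 : Nat) : Int) := by push_cast; omega
      simp only [List.replicate, List.cons_append, pvGoA, reduceIte, hj0, if_false, hret, hle]
    · have hrec := ih rest (i + 1) (j + 1) st (by omega) (by omega) hrest
      simp only [List.replicate, List.cons_append, pvGoA, reduceIte, hj0, if_false, hret]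
      rw [hrec]
      have harith : j + 1 + (m : Int) = j + ((m + 1 : Nat) : Int) := by push_cast; ring
      have harith2 : i + 1 + (m : Int) = i + ((m + 1 : Nat) : Int) := by push_cast; ring
      rw [harith, harith2]

-- A on a full run of m ≥ 1 dots starting fresh (free = 0): returns i iff fl ≤ m.
theorem pvGoA_run (fl : Int) (hfl : 1 ≤ fl) :
    ∀ (m : Nat) (rest : List String) (i st : Int), 1 ≤ m →
      rest.head? ≠ some "." →
      pvGoA fl (List.replicate m "." ++ rest) i 0 st =
        if fl ≤ (m : Int) then i else pvGoA fl rest (i + m) 0 st := by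
  intro m rest i st hm hrest
  obtain ⟨m', rfl⟩ : ∃ m', m = m' + 1 := ⟨m - 1, by omega⟩
  by_cases h1 : (0 : Int) + 1 = fl
  · have hle : fl ≤ ((m' + 1 : Nat) : Int) := by push_cast; omega
    simp only [List.replicate, List.cons_append, pvGoA, reduceIte, h1, hle]
  · have hrec := pvGoA_run_mid fl m' rest (i + 1) 1 i (by omega) (by omega) hrest
    simp only [List.replicate, List.cons_append, pvGoA, reduceIte, h1, if_false]
    rw [show (0 : Int) + 1 = 1 by ring, hrec]
    have hc : (fl ≤ 1 + (m' : Int)) ↔ (fl ≤ ((m' + 1 : Nat) : Int)) := by push_cast; omega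
    by_cases hcond : fl ≤ ((m' + 1 : Nat) : Int)
    · rw [if_pos (hc.mpr hcond), if_pos hcond]
    · have hn : ¬ fl ≤ 1 + (m' : Int) := fun h => hcond (hc.mp h)
      simp only [hn, if_false, hcond, if_false]
      rw [pvGoA_start_irrel fl rest _ i st]
      congr 1
      push_cast; ring

-- B: scanning a group under construction with a non-'.' key just advances the index.
theorem pvScanB_groupGo_ne (fl : Int) :
    ∀ (rest : List String) (k : String) (n : Nat) (i : Int), k ≠ "." →
      pvScanB fl (pvGroupGo rest k n) i = pvScanB fl (pvGroups rest) (i + n) := by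
  intro rest
  induction rest with
  | nil => intro k n i hk; simp [pvGroupGo, pvScanB, pvGroups, hk]
  | cons b t ih =>
    intro k n i hk
    by_cases hb : b = k
    · simp only [pvGroupGo, if_pos hb, pvGroups]
      rw [ih k (n + 1) i hk, ih b 1 (i + n) (hb ▸ hk)]
      congr 1; push_cast; ring
    · simp only [pvGroupGo, if_neg hb, pvScanB, hk, false_and, if_false]
      cases t <;> rfl

-- B: a group of dots under construction over replicate m "." ++ rest.
theorem pvScanB_groupGo_dots (fl : Int) :
    ∀ (m : Nat) (rest : List String) (n : Nat) (i : Int), rest.head? ≠ some "." →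
      pvScanB fl (pvGroupGo (List.replicate m "." ++ rest) "." n) i =
        if fl ≤ ((n : Int) + m) then i else pvScanB fl (pvGroups rest) (i + n + m) := by
  intro m
  induction m with
  | zero =>
    intro rest n i hrest
    simp only [List.replicate, List.nil_append, Nat.cast_zero, add_zero]
    cases rest with
    | nil => simp [pvGroupGo, pvScanB, pvGroups]
    | cons b t =>
      have hb : b ≠ "." := by intro h; apply hrest; simp [h]
      have hb' : ¬ (b = ".") := hb
      simp only [pvGroupGo, if_neg hb', pvScanB, true_and]
      by_cases hc : fl ≤ (n : Int)
      · simp [hc]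
      · simp only [if_neg hc]
        rw [pvScanB_groupGo_ne fl t b 1 (i + n) hb,
          show pvGroups (b :: t) = pvGroupGo t b 1 from rfl,
          pvScanB_groupGo_ne fl t b 1 (i + n) hb]
  | succ m ih =>
    intro rest n i hrest
    simp only [List.replicate, List.cons_append, pvGroupGo, reduceIte]
    rw [ih rest (n + 1) i hrest]
    have hc : ((n + 1 : Nat) : Int) + m = (n : Int) + ((m + 1 : Nat) : Int) := by push_cast; ring
    rw [hc]
    congr 1
    push_cast; ring

-- head of dropWhile does not satisfy the predicate
theorem pvDropWhile_head (p : String → Bool) :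
    ∀ (l : List String) (x : String), (List.dropWhile p l).head? = some x → p x = false := by
  intro l
  induction l with
  | nil => intro x h; simp [List.dropWhile] at h
  | cons b t ih =>
    intro x h
    by_cases hb : p b
    · rw [List.dropWhile_cons_of_pos hb] at h; exact ih x h
    · rw [List.dropWhile_cons_of_neg hb] at h
      simp only [List.head?_cons, Option.some.injEq] at h
      subst h
      simpa using hb

-- Main loop equivalence for fl ≥ 1, by strong induction on the list length.
theorem pvMain (fl : Int) (hfl : 1 ≤ fl) :
    ∀ (n : Nat) (l : List String), l.length = n → ∀ (i st : Int),
      pvGoA fl l i 0 st = pvScanB fl (pvGroups l) i := by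
  intro n
  induction n using Nat.strong_induction_on with
  | _ n ih =>
    intro l hlen i st
    cases l with
    | nil => rfl
    | cons b t =>
      by_cases hb : b = "."
      · -- leading dot run
        subst hb
        obtain ⟨m, rest, hm1, hsplit, hhead⟩ :
            ∃ (m : Nat) (rest : List String), 1 ≤ m ∧
              List.replicate m "." ++ rest = "." :: t ∧ rest.head? ≠ some "." := by
          refine ⟨(List.takeWhile (fun s => s == ".") ("." :: t)).length,
            List.dropWhile (fun s => s == ".") ("." :: t), ?_, ?_, ?_⟩
          · rw [List.takeWhile_cons_of_pos (by simp)]; simp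
          · have htake : List.takeWhile (fun s => s == ".") ("." :: t) =
                List.replicate (List.takeWhile (fun s => s == ".") ("." :: t)).length "." := by
              rw [List.eq_replicate_iff]
              refine ⟨rfl, ?_⟩
              intro x hx
              have := List.mem_takeWhile_imp hx
              simpa using this
            rw [← htake]
            exact List.takeWhile_append_dropWhile
          · intro h
            have := pvDropWhile_head (fun s => s == ".") ("." :: t) "." h
            simp at this
        have hlrest : rest.length < n := by
          have hlen2 := congrArg List.length hsplit
          simp at hlen2
          simp at hlen
          omega
        have hA : pvGoA fl ("." :: t) i 0 st =
            if fl ≤ (m : Int) then i else pvGoA fl rest (i + m) 0 st := by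
          rw [← hsplit]; exact pvGoA_run fl hfl m rest i st hm1 hhead
        have hB : pvScanB fl (pvGroups ("." :: t)) i =
            if fl ≤ (m : Int) then i else pvScanB fl (pvGroups rest) (i + m) := by
          obtain ⟨m', rfl⟩ : ∃ m', m = m' + 1 := ⟨m - 1, by omega⟩
          rw [← hsplit]
          have hrw : List.replicate (m' + 1) "." ++ rest = "." :: (List.replicate m' "." ++ rest) := by
            simp [List.replicate]
          rw [hrw]
          show pvScanB fl (pvGroupGo (List.replicate m' "." ++ rest) "." 1) i = _
          rw [pvScanB_groupGo_dots fl m' rest 1 i hhead]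
          have h1 : ((1 : Nat) : Int) + (m' : Int) = ((m' + 1 : Nat) : Int) := by push_cast; ring
          rw [h1]
          congr 1
          push_cast; ring
        rw [hA, hB]
        by_cases hc : fl ≤ (m : Int)
        · simp [hc]
        · simp only [if_neg hc]
          exact ih rest.length hlrest rest rfl (i + m) st
      · -- non-dot head
        have hA : pvGoA fl (b :: t) i 0 st = pvGoA fl t (i + 1) 0 st := by
          simp [pvGoA, hb]
        have hB : pvScanB fl (pvGroups (b :: t)) i = pvScanB fl (pvGroups t) (i + 1) := by
          show pvScanB fl (pvGroupGo t b 1) i = _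
          rw [pvScanB_groupGo_ne fl t b 1 i hb]
          norm_num
        rw [hA, hB]
        have hlt : t.length < n := by simp at hlen; omega
        exact ih t.length hlt t rfl (i + 1) st

-- ===== VERDICT (by name: the statement is the Claim_ definition above) =====
theorem find_leftmost_space_spec : Claim_equal_find_leftmost_space := by
  intro blocks fl _
  unfold Spec_find_leftmost_space find_leftmost_space find_leftmost_space_alt
  by_cases hfl : fl < 1
  · rw [if_pos hfl]
    exact pvGoA_neg fl hfl blocks 0 0 (-1) le_rfl
  · rw [if_neg hfl]
    exact pvMain fl (by omega) blocks.length blocks rfl 0 (-1)
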